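-- pv_equiv track=rewrite | github.com/sang731/wumpus-world-game | src/levels/generator.py | has_neighboring_pits_in_same_row
-- ===== SOURCE A (Python) =====
-- def has_neighboring_pits_in_same_row(cell, pits):
--     x, y = cell
--
--     for pit in pits:
--         pit_x, pit_y = pit
--         if pit_y == y:
--             if abs(pit_x - x) == 1:
--                 return True
--     return False
-- ===== SOURCE B (Python) =====
-- def has_neighboring_pits_in_same_row(cell, pits):
--     x, y = cell
--     rows = {}
--     for px, py in pits:
--         rows.setdefault(py, []).append(px)
--     return any(abs(px - x) == 1 for px in rows.get(y, []))
-- ===== Notes on version B (the rewrite author's own statement) =====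
-- stated objective: alternative
-- what changed: B first builds a dict index grouping pit x-coordinates by row, then scans only the bucket for the cell's row for a distance-1 x, instead of A's single unpack-and-filter scan over all pits.
import Mathlib
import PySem

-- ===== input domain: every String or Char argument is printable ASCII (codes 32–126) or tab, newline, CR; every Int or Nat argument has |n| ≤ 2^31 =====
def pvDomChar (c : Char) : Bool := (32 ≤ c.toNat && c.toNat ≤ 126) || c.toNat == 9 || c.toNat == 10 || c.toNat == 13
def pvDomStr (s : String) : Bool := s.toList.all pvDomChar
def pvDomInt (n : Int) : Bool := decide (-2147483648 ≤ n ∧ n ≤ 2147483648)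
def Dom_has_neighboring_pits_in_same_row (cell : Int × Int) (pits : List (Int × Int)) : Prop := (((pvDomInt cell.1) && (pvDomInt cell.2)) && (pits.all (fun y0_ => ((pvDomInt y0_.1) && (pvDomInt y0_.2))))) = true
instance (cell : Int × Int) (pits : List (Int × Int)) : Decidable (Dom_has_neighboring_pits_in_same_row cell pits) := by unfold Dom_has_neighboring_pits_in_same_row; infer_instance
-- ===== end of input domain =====

-- B builds a dict index of pit x-coordinates grouped by row, then scans only the cell's row bucket (alternative decomposition).
-- ===== PORT A =====
-- loop over pits, unpack, check same row and |pit_x - x| == 1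
def pvLoopA (x y : Int) : List (Int × Int) → Bool
  | [] => false
  | pit :: rest =>
    let pit_x := pit.1
    let pit_y := pit.2
    if pit_y = y then
      if (pit_x - x).natAbs = 1 then true else pvLoopA x y rest
    else pvLoopA x y rest

def has_neighboring_pits_in_same_row (cell : Int × Int) (pits : List (Int × Int)) : Bool :=
  pvLoopA cell.1 cell.2 pits

-- ===== PORT B =====
-- B: rows = {}; for px, py in pits: rows.setdefault(py, []).append(px)  — i.e. rows[py] = rows.get(py, []) + [px]
--    then any(abs(px - x) == 1 for px in rows.get(y, []))
def has_neighboring_pits_in_same_row_alt (cell : Int × Int) (pits : List (Int × Int)) : Bool :=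
  let x := cell.1
  let y := cell.2
  let rows : PySem.Dict Int (List Int) :=
    pits.foldl (fun d p => d.modify p.2 [] (· ++ [p.1])) PySem.Dict.empty
  (rows.getD y []).any (fun px => (px - x).natAbs == 1)

-- ===== PRECONDITION & SPEC =====
def Spec_has_neighboring_pits_in_same_row (cell : Int × Int) (pits : List (Int × Int)) (out : Bool) : Prop := out = has_neighboring_pits_in_same_row_alt cell pits
instance (cell : Int × Int) (pits : List (Int × Int)) (out : Bool) : Decidable (Spec_has_neighboring_pits_in_same_row cell pits out) := by unfold Spec_has_neighboring_pits_in_same_row; infer_instance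

-- ===== CLAIM =====
def Claim_equal_has_neighboring_pits_in_same_row : Prop := ∀ (cell : Int × Int) (pits : List (Int × Int)), Dom_has_neighboring_pits_in_same_row cell pits → Spec_has_neighboring_pits_in_same_row cell pits (has_neighboring_pits_in_same_row cell pits)

-- ===== LEMMAS AND PROOFS =====

-- A's scan is "some pit in the same row at horizontal distance 1"
theorem pvLoopA_eq_any (x y : Int) (pits : List (Int × Int)) :
    pvLoopA x y pits = pits.any (fun p => p.2 == y && (p.1 - x).natAbs == 1) := by
  induction pits with
  | nil => simp [pvLoopA]
  | cons pit rest ih =>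
    simp only [pvLoopA, List.any_cons, ih]
    split_ifs with hy hx <;> simp_all

-- B's row bucket for y holds exactly the x-coords of the same-row pits, in order
theorem alt_bucket_eq (y : Int) (pits : List (Int × Int)) :
    ((pits.foldl (fun d p => d.modify p.2 [] (· ++ [p.1])) PySem.Dict.empty).getD y []) =
      ((pits.map Prod.swap).filter (fun p => p.1 == y)).map (·.2) := by
  have h := PySem.Dict.getD_foldl_modify_append (l := pits.map Prod.swap)
      (d := (PySem.Dict.empty : PySem.Dict Int (List Int))) (c := y)
  rw [List.foldl_map] at h
  simpa [Prod.swap] using h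

-- ===== VERDICT =====
theorem has_neighboring_pits_in_same_row_spec : Claim_equal_has_neighboring_pits_in_same_row := by
  intro cell pits _
  show _ = _
  simp only [has_neighboring_pits_in_same_row, has_neighboring_pits_in_same_row_alt,
    pvLoopA_eq_any, alt_bucket_eq]
  simp [List.any_filter, List.any_map, Function.comp_def]
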